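-- pv_equiv track=rewrite | github.com/scverse/scanpy | scanpy/utils.py | markdown_dict_string
-- ===== SOURCE A (Python) =====
-- def markdown_dict_string(d):
--     """
--     Markdown output that can be pasted in the examples/README.md.
--     """
--     # sort experimental data from simulated data
--     sorted_keys = []
--     sim_keys = []
--     for key, value in sorted(d.items()):
--         if 'type' in value:
--             if 'sim' in value['type']:
--                 sim_keys.append(key)
--         else:
--             sorted_keys.append(key)
--     len_exp = len(sorted_keys) - 1
--     sorted_keys += sim_keys
--     # format output
--     s = 'Examples using experimental data.\n'
--     for ikey, key in enumerate(sorted_keys):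
--         value = d[key]
--         s += '* [' + key + '](#' + key + ')'
--         if 'ref' in value:
--             if 'doi' in value:
--                 link = 'http://dx.doi.org/' + value['doi']
--             elif 'url' in value:
--                 link = value['url']
--             s += (' - [' +  value['ref'].replace('et al.','*et al.*')
--                          + '](' + link +  ')')
--         if 'title' in value:
--             s += '   \n*' + value['title'] + '*'
--         s += '\n'
--         if ikey == len_exp:
--             s += '\nExamples using simulated data.\n'
--     return s
-- ===== SOURCE B (Python) =====
-- def _render(key, value):
--     parts = ['* [', key, '](#', key, ')']
--     if 'ref' in value:
--         link = ('http://dx.doi.org/' + value['doi']) if 'doi' in value else value['url']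
--         parts += [' - [', value['ref'].replace('et al.', '*et al.*'), '](', link, ')']
--     if 'title' in value:
--         parts += ['   \n*', value['title'], '*']
--     parts.append('\n')
--     return ''.join(parts)
--
--
-- def markdown_dict_string(d):
--     """
--     Markdown output that can be pasted in the examples/README.md.
--     """
--     # single pass over the sorted items, rendering straight into two buffers
--     exp_s = ''
--     sim_s = ''
--     for key, value in sorted(d.items()):
--         if 'type' not in value:
--             exp_s += _render(key, value)
--         elif 'sim' in value['type']:
--             sim_s += _render(key, value)
--     out = 'Examples using experimental data.\n' + exp_s
--     if exp_s:
--         out += '\nExamples using simulated data.\n'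
--     return out + sim_s
-- ===== Notes on version B (the rewrite author's own statement) =====
-- stated objective: simpler
-- what changed: A first partitions the sorted keys into two lists, then runs a second enumerate-driven loop that re-looks every key up in d and splices the simulated-data header in when the running index hits len(exp)-1; B makes a single pass over sorted(d.items()) that renders each entry immediately (via a parts-list join) into one of two string buffers, then concatenates header + experimental buffer + (simulated header if that buffer is non-empty) + simulated buffer.
-- outside the precondition, e.g. on markdown_dict_string({'b': {'ref': 'S'}}): A raises UnboundLocalError, B raises KeyError
import Mathlib
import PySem

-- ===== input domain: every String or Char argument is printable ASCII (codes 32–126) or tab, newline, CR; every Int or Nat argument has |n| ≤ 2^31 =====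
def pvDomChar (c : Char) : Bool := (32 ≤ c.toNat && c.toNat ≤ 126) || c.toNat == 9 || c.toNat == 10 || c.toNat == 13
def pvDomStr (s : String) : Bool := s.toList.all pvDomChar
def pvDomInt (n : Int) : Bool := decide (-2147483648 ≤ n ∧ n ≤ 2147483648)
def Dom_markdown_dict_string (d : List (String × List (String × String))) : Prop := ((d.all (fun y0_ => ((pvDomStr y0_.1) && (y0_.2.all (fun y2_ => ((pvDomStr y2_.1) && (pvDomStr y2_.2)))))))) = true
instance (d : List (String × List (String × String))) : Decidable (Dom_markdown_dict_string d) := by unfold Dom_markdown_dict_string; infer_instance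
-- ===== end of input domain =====

-- B replaces A's two-stage scheme (partition the sorted keys into two lists, then an
-- enumerate-driven loop that re-looks each key up in d and splices the header in at index
-- len(exp)-1) by ONE pass over sorted(d.items()) that renders every entry immediately into one
-- of two string buffers, emitting the simulated-data header iff the experimental buffer is
-- non-empty: objective 'simpler'. Equivalence is proved on Pre_.

-- ===== PORT A =====
-- body of A's formatting loop; the state is (s, link): 'link' models Python's variable that
-- survives across iterations (read only when 'ref' is present but neither 'doi' nor 'url' is —
-- excluded by Pre_, where Python raises UnboundLocalError or reuses the stale link)
def pvBodyA (d : List (String × List (String × String))) (lenExp : Int)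
    (st : String × String) (ik : Int × String) : String × String :=
  let value := PySem.Dict.getD (PySem.Dict.mk d) ik.2 []
  let s := st.1 ++ "* [" ++ ik.2 ++ "](#" ++ ik.2 ++ ")"
  let sl :=
    match PySem.Dict.get? (PySem.Dict.mk value) "ref" with
    | some r =>
      let link :=
        match PySem.Dict.get? (PySem.Dict.mk value) "doi" with
        | some doi => "http://dx.doi.org/" ++ doi
        | none =>
          match PySem.Dict.get? (PySem.Dict.mk value) "url" with
          | some url => url
          | none => st.2
      (s ++ " - [" ++ PySem.Str.replace r "et al." "*et al.*" ++ "](" ++ link ++ ")", link)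
    | none => (s, st.2)
  let s2 :=
    match PySem.Dict.get? (PySem.Dict.mk value) "title" with
    | some t => sl.1 ++ "   \n*" ++ t ++ "*"
    | none => sl.1
  let s3 := s2 ++ "\n"
  (if ik.1 = lenExp then s3 ++ "\nExamples using simulated data.\n" else s3, sl.2)

-- first loop of A: sort keys into (sorted_keys, sim_keys)
def pvSplitA (acc : List String × List String) (p : String × List (String × String)) :
    List String × List String :=
  match PySem.Dict.get? (PySem.Dict.mk p.2) "type" with
  | some t => if PySem.Str.isIn "sim" t then (acc.1, acc.2 ++ [p.1]) else acc
  | none => (acc.1 ++ [p.1], acc.2)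

def markdown_dict_string (d : List (String × List (String × String))) : String :=
  -- sorted(d.items()): dict keys are distinct (Pre_), so Python's tuple sort orders by key
  let items := PySem.List.sorted d (fun p => p.1) false
  let ks := items.foldl pvSplitA ([], [])
  let lenExp : Int := PySem.List.len ks.1 - 1
  let sortedKeys := ks.1 ++ ks.2
  ((PySem.List.enumerate sortedKeys 0).foldl (pvBodyA d lenExp)
      ("Examples using experimental data.\n", "")).1

-- ===== PORT B =====
-- _render of Source B: builds the parts list and joins it; value['url'] (KeyError when absent,
-- excluded by Pre_) is ported as getD ""
def pvRender (key : String) (value : List (String × String)) : String :=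
  let parts : List String := ["* [", key, "](#", key, ")"]
  let parts :=
    match PySem.Dict.get? (PySem.Dict.mk value) "ref" with
    | some r =>
      let link :=
        match PySem.Dict.get? (PySem.Dict.mk value) "doi" with
        | some doi => "http://dx.doi.org/" ++ doi
        | none => PySem.Dict.getD (PySem.Dict.mk value) "url" ""
      parts ++ [" - [", PySem.Str.replace r "et al." "*et al.*", "](", link, ")"]
    | none => parts
  let parts :=
    match PySem.Dict.get? (PySem.Dict.mk value) "title" with
    | some t => parts ++ ["   \n*", t, "*"]
    | none => parts
  PySem.Str.join "" (parts ++ ["\n"])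

-- the single loop of Source B: state is the two buffers (exp_s, sim_s)
def pvBodyB (st : String × String) (p : String × List (String × String)) : String × String :=
  match PySem.Dict.get? (PySem.Dict.mk p.2) "type" with
  | none => (st.1 ++ pvRender p.1 p.2, st.2)
  | some t => if PySem.Str.isIn "sim" t then (st.1, st.2 ++ pvRender p.1 p.2) else st

def markdown_dict_string_alt (d : List (String × List (String × String))) : String :=
  let items := PySem.List.sorted d (fun p => p.1) false
  let es := items.foldl pvBodyB ("", "")
  let out := "Examples using experimental data.\n" ++ es.1
  let out := if es.1 ≠ "" then out ++ "\nExamples using simulated data.\n" else out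
  out ++ es.2

-- ===== PRECONDITION & SPEC =====
-- an entry is rendered iff it has no 'type' or its 'type' contains 'sim'
def pvRendered (v : List (String × String)) : Bool :=
  match PySem.Dict.get? (PySem.Dict.mk v) "type" with
  | none => true
  | some t => PySem.Str.isIn "sim" t

def pvLinkOK (v : List (String × String)) : Bool :=
  !(PySem.Dict.get? (PySem.Dict.mk v) "ref").isSome
  || (PySem.Dict.get? (PySem.Dict.mk v) "doi").isSome
  || (PySem.Dict.get? (PySem.Dict.mk v) "url").isSome

-- Pre_ requires (a) distinct keys — the argument is a Python dict, whose keys are unique, so a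
-- duplicate-key list has no dict counterpart — and (b) no rendered entry with 'ref' but neither
-- 'doi' nor 'url': there A raises UnboundLocalError (first such entry) or reuses the previous
-- entry's leftover 'link' (later ones), and B raises KeyError.
def Pre_markdown_dict_string (d : List (String × List (String × String))) : Prop :=
  (d.map Prod.fst).Nodup ∧ ∀ p ∈ d, pvRendered p.2 = true → pvLinkOK p.2 = true
instance (d : List (String × List (String × String))) : Decidable (Pre_markdown_dict_string d) := by
  unfold Pre_markdown_dict_string; infer_instance

def pvWitness_markdown_dict_string : (List (String × List (String × String))) :=
  [("a", [("ref", "Smith et al."), ("doi", "10.1/x"), ("title", "T")]), ("z", [("type", "sim")])]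

def Spec_markdown_dict_string (d : List (String × List (String × String))) (out : String) : Prop := out = markdown_dict_string_alt d
instance (d : List (String × List (String × String))) (out : String) : Decidable (Spec_markdown_dict_string d out) := by unfold Spec_markdown_dict_string; infer_instance

-- ===== CLAIM (what is proved, stated in full; the proofs are below) =====
def Claim_equal_markdown_dict_string : Prop := ∀ (d : List (String × List (String × String))), Dom_markdown_dict_string d → Pre_markdown_dict_string d → Spec_markdown_dict_string d (markdown_dict_string d)

-- ===== LEMMAS AND PROOFS =====

-- the entry string A's loop body appends for key k (looked up in d)
def pvEntry (key : String) (value : List (String × String)) : String :=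
  let s := "* [" ++ key ++ "](#" ++ key ++ ")"
  let s :=
    match PySem.Dict.get? (PySem.Dict.mk value) "ref" with
    | some r =>
      let link :=
        match PySem.Dict.get? (PySem.Dict.mk value) "doi" with
        | some doi => "http://dx.doi.org/" ++ doi
        | none => PySem.Dict.getD (PySem.Dict.mk value) "url" ""
      s ++ " - [" ++ PySem.Str.replace r "et al." "*et al.*" ++ "](" ++ link ++ ")"
    | none => s
  let s :=
    match PySem.Dict.get? (PySem.Dict.mk value) "title" with
    | some t => s ++ "   \n*" ++ t ++ "*"
    | none => s
  s ++ "\n"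

def pvEntryOf (d : List (String × List (String × String))) (k : String) : String :=
  pvEntry k (PySem.Dict.getD (PySem.Dict.mk d) k [])

-- the two key lists A's first loop produces
def pvExpKeys (items : List (String × List (String × String))) : List String :=
  items.filterMap (fun p =>
    if (PySem.Dict.get? (PySem.Dict.mk p.2) "type").isNone then some p.1 else none)

def pvSimKeys (items : List (String × List (String × String))) : List String :=
  items.filterMap (fun p =>
    if PySem.Str.isIn "sim" (PySem.Dict.getD (PySem.Dict.mk p.2) "type" "") then some p.1 else none)

-- the corresponding item sublists
def pvExpItems (items : List (String × List (String × String))) :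
    List (String × List (String × String)) :=
  items.filter (fun p => (PySem.Dict.get? (PySem.Dict.mk p.2) "type").isNone)

def pvSimItems (items : List (String × List (String × String))) :
    List (String × List (String × String)) :=
  items.filter (fun p => PySem.Str.isIn "sim" (PySem.Dict.getD (PySem.Dict.mk p.2) "type" ""))

def pvJoinR (l : List (String × List (String × String))) : String :=
  PySem.Str.join "" (l.map (fun p => pvRender p.1 p.2))

-- what A's formatting loop appends for the key list starting at enumerate index i
def pvF (d : List (String × List (String × String))) (lenExp : Int) :
    Int → List String → String
  | _, [] => ""
  | i, k :: ks =>
      pvEntryOf d k ++ (if i = lenExp then "\nExamples using simulated data.\n" else "") ++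
        pvF d lenExp (i + 1) ks

theorem pv_join_cons (x : String) (xs : List String) :
    PySem.Str.join "" (x :: xs) = x ++ PySem.Str.join "" xs := by
  simp [PySem.Str.join, PySem.Chars.join, List.intercalate]
  cases xs <;> simp

theorem pv_join_nil : PySem.Str.join "" ([] : List String) = "" := by decide

-- merging two adjacent string literals under a right append
theorem pv_lit_cat (a b c : String) (h : a ++ b = c) (r : String) :
    a ++ (b ++ r) = c ++ r := by rw [← h, String.append_assoc]

theorem pv_entry_eq_render (k : String) (v : List (String × String)) :
    pvEntry k v = pvRender k v := by
  unfold pvEntry pvRender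
  rcases hr : PySem.Dict.get? (PySem.Dict.mk v) "ref" with _ | r <;>
    rcases ht : PySem.Dict.get? (PySem.Dict.mk v) "title" with _ | t <;>
      [skip; skip; rcases hd : PySem.Dict.get? (PySem.Dict.mk v) "doi" with _ | doi;
       rcases hd : PySem.Dict.get? (PySem.Dict.mk v) "doi" with _ | doi] <;>
    simp [pv_join_cons, pv_join_nil, String.append_assoc,
      pv_lit_cat ")" " - [" ") - [" (by decide), pv_lit_cat ")" "   \n*" ")   \n*" (by decide)]

theorem pv_split_eq (items : List (String × List (String × String))) :
    ∀ acc, items.foldl pvSplitA acc = (acc.1 ++ pvExpKeys items, acc.2 ++ pvSimKeys items) := by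
  induction items with
  | nil => intro acc; simp [pvExpKeys, pvSimKeys]
  | cons p rest ih =>
    intro acc
    have hsim0 : PySem.Str.isIn "sim" "" = false := by decide
    rw [List.foldl_cons, ih]
    rcases h : PySem.Dict.get? (PySem.Dict.mk p.2) "type" with _ | t
    · have h2 : PySem.Dict.getD (PySem.Dict.mk p.2) "type" "" = "" :=
        PySem.Dict.getD_of_get?_eq_none _ _ h
      simp only [pvSplitA, pvExpKeys, pvSimKeys, List.filterMap_cons, h, h2, hsim0,
        Option.isNone_none, if_pos, Bool.false_eq_true, ite_false]
      simp
    · have h2 : PySem.Dict.getD (PySem.Dict.mk p.2) "type" "" = t :=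
        PySem.Dict.getD_of_get?_eq_some _ _ h
      by_cases hs : PySem.Str.isIn "sim" t = true <;>
        simp only [pvSplitA, pvExpKeys, pvSimKeys, List.filterMap_cons, h, h2, hs,
          Option.isNone_some, Bool.false_eq_true, ite_false, ite_true] <;>
        simp

-- B's fold produces (exp buffer, sim buffer) = the joined renders of the two filtered sublists
theorem pv_foldB_eq (items : List (String × List (String × String))) :
    ∀ a b, items.foldl pvBodyB (a, b) =
      (a ++ pvJoinR (pvExpItems items), b ++ pvJoinR (pvSimItems items)) := by
  induction items with
  | nil => intro a b; simp [pvExpItems, pvSimItems, pvJoinR, pv_join_nil]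
  | cons p rest ih =>
    intro a b
    rcases h : PySem.Dict.get? (PySem.Dict.mk p.2) "type" with _ | t
    · have h2 : PySem.Dict.getD (PySem.Dict.mk p.2) "type" "" = "" :=
        PySem.Dict.getD_of_get?_eq_none _ _ h
      have hcS : PySem.Str.isIn "sim" (PySem.Dict.getD (PySem.Dict.mk p.2) "type" "") = false := by
        rw [h2]; decide
      have hE : pvExpItems (p :: rest) = p :: pvExpItems rest := by
        simp only [pvExpItems, List.filter_cons, h]; simp
      have hSm : pvSimItems (p :: rest) = pvSimItems rest := by
        simp only [pvSimItems, List.filter_cons, hcS]; simp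
      have hb : pvBodyB (a, b) p = (a ++ pvRender p.1 p.2, b) := by
        simp only [pvBodyB, h]
      rw [List.foldl_cons, hb, ih, hE, hSm]
      simp [pvJoinR, pv_join_cons, String.append_assoc]
    · have h2 : PySem.Dict.getD (PySem.Dict.mk p.2) "type" "" = t :=
        PySem.Dict.getD_of_get?_eq_some _ _ h
      have hEc : pvExpItems (p :: rest) = pvExpItems rest := by
        simp only [pvExpItems, List.filter_cons, h]; simp
      by_cases hs : PySem.Str.isIn "sim" t = true
      · have hcS : PySem.Str.isIn "sim" (PySem.Dict.getD (PySem.Dict.mk p.2) "type" "") = true := by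
          rw [h2]; exact hs
        have hSm : pvSimItems (p :: rest) = p :: pvSimItems rest := by
          simp only [pvSimItems, List.filter_cons, hcS]; simp
        have hb : pvBodyB (a, b) p = (a, b ++ pvRender p.1 p.2) := by
          simp only [pvBodyB, h, hs]; simp
        rw [List.foldl_cons, hb, ih, hEc, hSm]
        simp [pvJoinR, pv_join_cons, String.append_assoc]
      · have hs' : PySem.Str.isIn "sim" t = false := by
          revert hs; cases PySem.Str.isIn "sim" t <;> simp
        have hcS : PySem.Str.isIn "sim" (PySem.Dict.getD (PySem.Dict.mk p.2) "type" "") = false := by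
          rw [h2]; exact hs'
        have hSm : pvSimItems (p :: rest) = pvSimItems rest := by
          simp only [pvSimItems, List.filter_cons, hcS]; simp
        have hb : pvBodyB (a, b) p = (a, b) := by
          simp only [pvBodyB, h, hs']; simp
        rw [List.foldl_cons, hb, ih, hEc, hSm]

theorem pv_expKeys_eq_map (items : List (String × List (String × String))) :
    pvExpKeys items = (pvExpItems items).map Prod.fst := by
  induction items with
  | nil => rfl
  | cons p rest ih =>
    rcases h : PySem.Dict.get? (PySem.Dict.mk p.2) "type" with _ | t <;>
      simp only [pvExpKeys, pvExpItems, List.filterMap_cons, List.filter_cons, h,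
        Option.isNone_none, Option.isNone_some, if_true, if_false, Bool.false_eq_true,
        List.map_cons] <;>
      first | exact congrArg _ ih | exact ih

theorem pv_simKeys_eq_map (items : List (String × List (String × String))) :
    pvSimKeys items = (pvSimItems items).map Prod.fst := by
  induction items with
  | nil => rfl
  | cons p rest ih =>
    cases hc : PySem.Str.isIn "sim" (PySem.Dict.getD (PySem.Dict.mk p.2) "type" "") <;>
      simp only [pvSimKeys, pvSimItems, List.filterMap_cons, List.filter_cons, hc,
        Bool.false_eq_true, if_false, if_true, List.map_cons] <;>
      first | exact congrArg _ ih | exact ih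

theorem pv_body_fst (d : List (String × List (String × String))) (lenExp : Int)
    (st : String × String) (ik : Int × String)
    (h : pvLinkOK (PySem.Dict.getD (PySem.Dict.mk d) ik.2 []) = true) :
    (pvBodyA d lenExp st ik).1 =
      st.1 ++ (pvEntryOf d ik.2 ++
        (if ik.1 = lenExp then "\nExamples using simulated data.\n" else "")) := by
  unfold pvBodyA pvEntryOf pvEntry
  set v := PySem.Dict.getD (PySem.Dict.mk d) ik.2 [] with hv
  rcases hr : PySem.Dict.get? (PySem.Dict.mk v) "ref" with _ | r
  · rcases ht : PySem.Dict.get? (PySem.Dict.mk v) "title" with _ | t <;>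
      split_ifs <;> simp [hr, ht, String.append_assoc]
  · rcases hd : PySem.Dict.get? (PySem.Dict.mk v) "doi" with _ | doi
    · rcases hu : PySem.Dict.get? (PySem.Dict.mk v) "url" with _ | url
      · exfalso; simp [pvLinkOK, hr, hd, hu] at h
      · have h2 : PySem.Dict.getD (PySem.Dict.mk v) "url" "" = url :=
          PySem.Dict.getD_of_get?_eq_some _ _ hu
        rcases ht : PySem.Dict.get? (PySem.Dict.mk v) "title" with _ | t <;>
          split_ifs <;> simp [hr, hd, hu, ht, h2, String.append_assoc]
    · rcases ht : PySem.Dict.get? (PySem.Dict.mk v) "title" with _ | t <;>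
        split_ifs <;> simp [hr, hd, ht, String.append_assoc]

theorem pv_fold2_eq (d : List (String × List (String × String))) (lenExp : Int) :
    ∀ (keys : List String) (i : Int) (s0 link0 : String),
      (∀ k ∈ keys, pvLinkOK (PySem.Dict.getD (PySem.Dict.mk d) k []) = true) →
      ((PySem.List.enumerate keys i).foldl (pvBodyA d lenExp) (s0, link0)).1 =
        s0 ++ pvF d lenExp i keys := by
  intro keys
  induction keys with
  | nil => intro i s0 link0 _; simp [PySem.List.enumerate_nil, pvF]
  | cons k ks ih =>
    intro i s0 link0 hok
    rw [PySem.List.enumerate_cons, List.foldl_cons]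
    have hb := pv_body_fst d lenExp (s0, link0) (i, k) (hok k (by simp))
    have hsplit : pvBodyA d lenExp (s0, link0) (i, k) =
        ((pvBodyA d lenExp (s0, link0) (i, k)).1, (pvBodyA d lenExp (s0, link0) (i, k)).2) := rfl
    rw [hsplit, hb, ih (i + 1) _ _ (fun k' hk' => hok k' (by simp [hk']))]
    simp [pvF, String.append_assoc]

theorem pvF_nohdr (d : List (String × List (String × String))) (lenExp : Int) :
    ∀ (keys : List String) (i : Int), lenExp < i →
      pvF d lenExp i keys = PySem.Str.join "" (keys.map (pvEntryOf d)) := by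
  intro keys
  induction keys with
  | nil => intro i _; simp [pvF, pv_join_nil]
  | cons k ks ih =>
    intro i hi
    rw [List.map_cons, pv_join_cons, pvF, if_neg (by omega), ih (i + 1) (by omega)]
    simp

theorem pvF_split (d : List (String × List (String × String))) (lenExp : Int) :
    ∀ (exp : List String) (i : Int) (rest : List String), exp ≠ [] →
      i + exp.length = lenExp + 1 →
      pvF d lenExp i (exp ++ rest) =
        PySem.Str.join "" (exp.map (pvEntryOf d)) ++ "\nExamples using simulated data.\n" ++
          pvF d lenExp (i + exp.length) rest := by
  intro exp
  induction exp with
  | nil => intro i rest h _; exact absurd rfl h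
  | cons k ks ih =>
    intro i rest _ hlen
    rcases ks with _ | ⟨k2, ks'⟩
    · have hi : i = lenExp := by simp at hlen; omega
      simp only [List.singleton_append, pvF, if_pos hi, List.map_cons, List.map_nil]
      have h1 : PySem.Str.join "" [pvEntryOf d k] = pvEntryOf d k := by
        simp [pv_join_cons, pv_join_nil]
      rw [h1]
      simp [String.append_assoc]
    · have hne : i ≠ lenExp := by simp at hlen ⊢; omega
      have hjoin2 : PySem.Str.join "" ((k :: k2 :: ks').map (pvEntryOf d)) =
          pvEntryOf d k ++ PySem.Str.join "" ((k2 :: ks').map (pvEntryOf d)) := by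
        rw [List.map_cons]; exact pv_join_cons _ _
      have hrec := ih (i + 1) rest (by simp) (by simp at hlen ⊢; omega)
      simp only [List.cons_append] at hrec ⊢
      rw [pvF, if_neg hne, hrec, hjoin2]
      have harith : i + 1 + ((k2 :: ks').length : Int) = i + ((k :: k2 :: ks').length : Int) := by
        simp; omega
      rw [harith]
      simp [String.append_assoc]

-- with distinct keys, looking a sorted item's key up in d gives back its value
theorem pv_getD_sorted (d : List (String × List (String × String)))
    (hnd : (d.map Prod.fst).Nodup) :
    ∀ p ∈ PySem.List.sorted d (fun p => p.1) false,
      PySem.Dict.getD (PySem.Dict.mk d) p.1 [] = p.2 := by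
  have hkeys : (PySem.Dict.mk d).keys.Nodup := by
    simpa [PySem.Dict.keys] using hnd
  intro p hp
  have hpd : p ∈ d := (PySem.List.mem_sorted _ _ _ _).mp hp
  have : (PySem.Dict.mk d).get? p.1 = some p.2 :=
    PySem.Dict.get?_of_mem_items _ (by exact hpd) hkeys
  exact PySem.Dict.getD_of_get?_eq_some _ _ this

-- every key produced by pvExpKeys/pvSimKeys looks up to a rendered, link-OK value
theorem pv_keys_ok (d : List (String × List (String × String)))
    (hnd : (d.map Prod.fst).Nodup)
    (hok : ∀ p ∈ d, pvRendered p.2 = true → pvLinkOK p.2 = true) :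
    ∀ k ∈ pvExpKeys (PySem.List.sorted d (fun p => p.1) false) ++
        pvSimKeys (PySem.List.sorted d (fun p => p.1) false),
      pvLinkOK (PySem.Dict.getD (PySem.Dict.mk d) k []) = true := by
  have hget := pv_getD_sorted d hnd
  intro k hk
  rcases List.mem_append.mp hk with h | h
  · rcases List.mem_filterMap.mp h with ⟨p, hp, hf⟩
    have hcond : (PySem.Dict.get? (PySem.Dict.mk p.2) "type").isNone = true ∧ p.1 = k := by
      by_cases hc : (PySem.Dict.get? (PySem.Dict.mk p.2) "type").isNone = true
      · refine ⟨hc, ?_⟩; rw [if_pos hc] at hf; exact Option.some.inj hf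
      · rw [if_neg hc] at hf; exact absurd hf (by simp)
    obtain ⟨hc, hpk⟩ := hcond
    have hrend : pvRendered p.2 = true := by
      unfold pvRendered
      rcases htype : PySem.Dict.get? (PySem.Dict.mk p.2) "type" with _ | t
      · rfl
      · rw [htype] at hc; simp at hc
    have := hok p ((PySem.List.mem_sorted _ _ _ _).mp hp) hrend
    rw [← hpk, hget p hp]
    exact this
  · rcases List.mem_filterMap.mp h with ⟨p, hp, hf⟩
    have hcond : PySem.Str.isIn "sim" (PySem.Dict.getD (PySem.Dict.mk p.2) "type" "") = true ∧
        p.1 = k := by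
      by_cases hc : PySem.Str.isIn "sim" (PySem.Dict.getD (PySem.Dict.mk p.2) "type" "") = true
      · refine ⟨hc, ?_⟩; rw [if_pos hc] at hf; exact Option.some.inj hf
      · rw [if_neg hc] at hf; exact absurd hf (by simp)
    obtain ⟨hc, hpk⟩ := hcond
    have hrend : pvRendered p.2 = true := by
      unfold pvRendered
      rcases htype : PySem.Dict.get? (PySem.Dict.mk p.2) "type" with _ | t
      · rfl
      · have h2 : PySem.Dict.getD (PySem.Dict.mk p.2) "type" "" = t :=
          PySem.Dict.getD_of_get?_eq_some _ _ htype
        rw [h2] at hc; exact hc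
    have := hok p ((PySem.List.mem_sorted _ _ _ _).mp hp) hrend
    rw [← hpk, hget p hp]
    exact this

-- join over a filtered item sublist: A's per-key entries coincide with B's per-item renders
theorem pv_join_entry_eq_render (d : List (String × List (String × String)))
    (hnd : (d.map Prod.fst).Nodup)
    (l : List (String × List (String × String)))
    (hsub : ∀ p ∈ l, p ∈ PySem.List.sorted d (fun p => p.1) false) :
    PySem.Str.join "" ((l.map Prod.fst).map (pvEntryOf d)) = pvJoinR l := by
  unfold pvJoinR
  rw [List.map_map]
  congr 1
  apply List.map_congr_left
  intro p hp
  have hg := pv_getD_sorted d hnd p (hsub p hp)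
  simp only [Function.comp, pvEntryOf, hg, pv_entry_eq_render]

theorem pv_joinR_ne_empty (p : String × List (String × String))
    (l : List (String × List (String × String))) :
    pvJoinR (p :: l) ≠ "" := by
  unfold pvJoinR
  rw [List.map_cons, pv_join_cons, ← pv_entry_eq_render]
  intro h
  have h2 := congrArg String.toList h
  simp [pvEntry] at h2

-- ===== VERDICT (by name: the statement is the Claim_ definition above) =====
theorem markdown_dict_string_spec : Claim_equal_markdown_dict_string := by
  intro d _ hpre
  obtain ⟨hnd, hok⟩ := hpre
  unfold Spec_markdown_dict_string markdown_dict_string markdown_dict_string_alt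
  dsimp only
  rw [pv_split_eq, pv_foldB_eq]
  simp only [List.nil_append, String.empty_append]
  have hko := pv_keys_ok d hnd hok
  rw [pv_fold2_eq d _ _ 0 _ _ hko]
  have hE := pv_join_entry_eq_render d hnd
    (pvExpItems (PySem.List.sorted d (fun p => p.1) false))
    (fun p hp => List.mem_of_mem_filter hp)
  have hS := pv_join_entry_eq_render d hnd
    (pvSimItems (PySem.List.sorted d (fun p => p.1) false))
    (fun p hp => List.mem_of_mem_filter hp)
  rw [pv_expKeys_eq_map, pv_simKeys_eq_map]
  rcases hexp : pvExpItems (PySem.List.sorted d (fun p => p.1) false) with _ | ⟨p0, ps0⟩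
  · -- no experimental entries: no header on either side
    clear hexp
    simp only [List.map_nil, List.nil_append, pv_join_nil] at hE ⊢
    rw [pvF_nohdr d _ _ 0 (by simp [PySem.List.len_eq]), hS]
    simp [pvJoinR, pv_join_nil]
  · -- at least one experimental entry: header after the experimental block on both sides
    rw [hexp] at hE
    have hne : ((p0 :: ps0).map Prod.fst) ≠ ([] : List String) := by simp
    have hlen : (0 : Int) + (((p0 :: ps0).map Prod.fst).length : Int) =
        (PySem.List.len ((p0 :: ps0).map Prod.fst) - 1) + 1 := by
      simp [PySem.List.len_eq]
    rw [pvF_split d _ _ 0 _ hne hlen,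
      pvF_nohdr d _ _ _ (by simp [PySem.List.len_eq]), hE, hS,
      if_pos (pv_joinR_ne_empty p0 ps0)]
    simp [String.append_assoc]
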